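-- pv_equiv track=rewrite | github.com/yuichihasegawa87-svg/stock-signal-bot | market_context.py | _build_event_summary
-- ===== SOURCE A (Python) =====
-- def _build_event_summary(overall: str, events: list) -> str:
--     """
--     影響度と検知したイベントリストから通知用テキストを生成する
--     events: [(影響度, イベント名, 国コード), ...]
--     """
--     IMPACT_LABEL = {
--         "HIGH":   "🔴 日本株への影響：**大きい**",
--         "MEDIUM": "🟡 日本株への影響：**中程度**",
--     }
--     IMPACT_DESC = {
--         "HIGH": (
--             "発表直後にドル円・日経先物が大きく動く傾向があります。\n"
--             "発表時刻をまたぐポジションは損切りラインを容易に超えるリスクがあります。"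
--         ),
--         "MEDIUM": (
--             "日本株への直接影響は限定的ですが、方向感に影響する可能性があります。\n"
--             "発表後の値動きを確認してからエントリーを判断することを推奨します。"
--         ),
--     }
--
--     lines = [IMPACT_LABEL[overall], ""]
--
--     # HIGH → MEDIUM の順で列挙
--     for impact in ("HIGH", "MEDIUM"):
--         for ev_impact, name, country in events:
--             if ev_impact != impact:
--                 continue
--             flag = "🇺🇸" if country == "US" else ("🇯🇵" if country == "JP" else "🌐")
--             tag  = "【要注意】" if impact == "HIGH" else "【注意】"
--             lines.append(f"{flag} {tag} {name}")
--
--     lines.append("")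
--     lines.append(IMPACT_DESC[overall])
--     return "\n".join(lines)
-- ===== SOURCE B (Python) =====
-- def _build_event_summary(overall: str, events: list) -> str:
--     """
--     影響度と検知したイベントリストから通知用テキストを生成する
--     events: [(影響度, イベント名, 国コード), ...]
--     """
--     IMPACT_LABEL = {
--         "HIGH":   "🔴 日本株への影響：**大きい**",
--         "MEDIUM": "🟡 日本株への影響：**中程度**",
--     }
--     IMPACT_DESC = {
--         "HIGH": (
--             "発表直後にドル円・日経先物が大きく動く傾向があります。\n"
--             "発表時刻をまたぐポジションは損切りラインを容易に超えるリスクがあります。"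
--         ),
--         "MEDIUM": (
--             "日本株への直接影響は限定的ですが、方向感に影響する可能性があります。\n"
--             "発表後の値動きを確認してからエントリーを判断することを推奨します。"
--         ),
--     }
--
--     high_lines = []
--     medium_lines = []
--     # single pass: bucket each event's formatted line by its impact
--     for ev_impact, name, country in events:
--         flag = "🇺🇸" if country == "US" else ("🇯🇵" if country == "JP" else "🌐")
--         tag = "【要注意】" if ev_impact == "HIGH" else "【注意】"
--         line = f"{flag} {tag} {name}"
--         if ev_impact == "HIGH":
--             high_lines.append(line)
--         elif ev_impact == "MEDIUM":
--             medium_lines.append(line)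
--
--     return "\n".join(
--         [IMPACT_LABEL[overall], ""]
--         + high_lines
--         + medium_lines
--         + ["", IMPACT_DESC[overall]]
--     )
-- ===== Notes on version B (the rewrite author's own statement) =====
-- stated objective: alternative
-- what changed: Replaces A's two filtered scans over events (one per impact level) with a single bucketing pass that appends each formatted line to a high or medium list, then emits label + high + medium + description in one concatenation.
import Mathlib
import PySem

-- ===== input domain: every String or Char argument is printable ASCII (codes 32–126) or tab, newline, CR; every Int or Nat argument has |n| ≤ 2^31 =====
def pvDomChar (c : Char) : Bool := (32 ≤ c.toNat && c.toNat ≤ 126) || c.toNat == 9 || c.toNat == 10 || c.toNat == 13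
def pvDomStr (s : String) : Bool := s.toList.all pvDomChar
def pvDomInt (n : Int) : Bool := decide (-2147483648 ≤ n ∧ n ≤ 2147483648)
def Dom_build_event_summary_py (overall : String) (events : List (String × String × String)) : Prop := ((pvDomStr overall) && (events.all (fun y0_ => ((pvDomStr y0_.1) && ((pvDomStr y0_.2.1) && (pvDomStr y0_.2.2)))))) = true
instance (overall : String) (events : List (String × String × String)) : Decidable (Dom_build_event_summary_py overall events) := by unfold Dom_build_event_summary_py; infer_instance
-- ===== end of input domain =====

-- B replaces A's two filtered scans over events with a single bucketing pass (alternative decomposition, same cost).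

-- ===== PORT A =====
def pvIMPACT_LABEL : PySem.Dict String String :=
  PySem.Dict.ofList [("HIGH", "🔴 日本株への影響：**大きい**"), ("MEDIUM", "🟡 日本株への影響：**中程度**")]
def pvIMPACT_DESC : PySem.Dict String String :=
  PySem.Dict.ofList
    [("HIGH", "発表直後にドル円・日経先物が大きく動く傾向があります。\n発表時刻をまたぐポジションは損切りラインを容易に超えるリスクがあります。"),
     ("MEDIUM", "日本株への直接影響は限定的ですが、方向感に影響する可能性があります。\n発表後の値動きを確認してからエントリーを判断することを推奨します。")]
def pvFlag (country : String) : String :=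
  if country == "US" then "🇺🇸" else (if country == "JP" then "🇯🇵" else "🌐")
def pvTag (impact : String) : String :=
  if impact == "HIGH" then "【要注意】" else "【注意】"

def build_event_summary_py (overall : String) (events : List (String × String × String)) : String :=
  let lines : List String := [(pvIMPACT_LABEL.get? overall).getD "", ""]
  let lines := ["HIGH", "MEDIUM"].foldl (fun lines impact =>
    events.foldl (fun lines ev =>
      if ev.1 != impact then lines
      else lines ++ [pvFlag ev.2.2 ++ " " ++ pvTag impact ++ " " ++ ev.2.1]) lines) lines
  let lines := lines ++ ["", (pvIMPACT_DESC.get? overall).getD ""]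
  PySem.Str.join "\n" lines

-- ===== PORT B =====
def build_event_summary_py_alt (overall : String) (events : List (String × String × String)) : String :=
  let buckets := events.foldl (fun (p : List String × List String) ev =>
    let line := pvFlag ev.2.2 ++ " " ++ pvTag ev.1 ++ " " ++ ev.2.1
    if ev.1 == "HIGH" then (p.1 ++ [line], p.2)
    else if ev.1 == "MEDIUM" then (p.1, p.2 ++ [line])
    else p) ([], [])
  PySem.Str.join "\n"
    ([(pvIMPACT_LABEL.get? overall).getD "", ""] ++ buckets.1 ++ buckets.2
      ++ ["", (pvIMPACT_DESC.get? overall).getD ""])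

-- ===== PRECONDITION & SPEC =====
-- Python A raises KeyError unless overall is "HIGH" or "MEDIUM" (the dict lookups); exactly those inputs are excluded.
def Pre_build_event_summary_py (overall : String) (events : List (String × String × String)) : Prop :=
  overall = "HIGH" ∨ overall = "MEDIUM"
instance (overall : String) (events : List (String × String × String)) : Decidable (Pre_build_event_summary_py overall events) := by unfold Pre_build_event_summary_py; infer_instance
def pvWitness_build_event_summary_py : String × (List (String × String × String)) :=
  ("HIGH", [("HIGH", "CPI", "US"), ("MEDIUM", "PMI", "JP"), ("LOW", "x", "DE")])

def Spec_build_event_summary_py (overall : String) (events : List (String × String × String)) (out : String) : Prop := out = build_event_summary_py_alt overall events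
instance (overall : String) (events : List (String × String × String)) (out : String) : Decidable (Spec_build_event_summary_py overall events out) := by unfold Spec_build_event_summary_py; infer_instance

-- ===== CLAIM (what is proved, stated in full; the proofs are below) =====
def Claim_equal_build_event_summary_py : Prop := ∀ (overall : String) (events : List (String × String × String)), Dom_build_event_summary_py overall events → Pre_build_event_summary_py overall events → Spec_build_event_summary_py overall events (build_event_summary_py overall events)

-- ===== LEMMAS AND PROOFS =====

def pvLine (ev : String × String × String) : String :=
  pvFlag ev.2.2 ++ " " ++ pvTag ev.1 ++ " " ++ ev.2.1

-- A's inner scan for a fixed impact equals a filterMap appended to the accumulator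
theorem pvA_inner (impact : String) (events : List (String × String × String))
    (acc : List String) :
    events.foldl (fun lines ev =>
      if ev.1 != impact then lines
      else lines ++ [pvFlag ev.2.2 ++ " " ++ pvTag impact ++ " " ++ ev.2.1]) acc
    = acc ++ events.filterMap (fun ev => if ev.1 == impact then some (pvLine ev) else none) := by
  induction events generalizing acc with
  | nil => simp
  | cons ev rest ih =>
    rw [List.foldl_cons, ih, List.filterMap_cons]
    by_cases h : ev.1 = impact
    · subst h
      simp [pvLine]
    · simp [h, bne_iff_ne]

-- B's single pass equals the two filterMaps appended to the accumulators
theorem pvB_fold (events : List (String × String × String))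
    (hs ms : List String) :
    events.foldl (fun (p : List String × List String) ev =>
      let line := pvFlag ev.2.2 ++ " " ++ pvTag ev.1 ++ " " ++ ev.2.1
      if ev.1 == "HIGH" then (p.1 ++ [line], p.2)
      else if ev.1 == "MEDIUM" then (p.1, p.2 ++ [line])
      else p) (hs, ms)
    = (hs ++ events.filterMap (fun ev => if ev.1 == "HIGH" then some (pvLine ev) else none),
       ms ++ events.filterMap (fun ev => if ev.1 == "MEDIUM" then some (pvLine ev) else none)) := by
  induction events generalizing hs ms with
  | nil => simp
  | cons ev rest ih =>
    rw [List.foldl_cons]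
    by_cases h1 : ev.1 = "HIGH"
    · simp only [h1]
      rw [show (("HIGH" : String) == "HIGH") = true by decide]
      simp only [if_true]
      rw [ih]
      simp [h1, pvLine]
    · by_cases h2 : ev.1 = "MEDIUM"
      · simp only [h2]
        rw [show (("MEDIUM" : String) == "HIGH") = false by decide,
            show (("MEDIUM" : String) == "MEDIUM") = true by decide]
        simp only [if_true]
        rw [ih]
        simp [h2, pvLine]
      · have b1 : (ev.1 == "HIGH") = false := by simp [h1]
        have b2 : (ev.1 == "MEDIUM") = false := by simp [h2]
        simp only [b1, b2, Bool.false_eq_true, if_false]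
        rw [ih]
        simp [h1, h2]

-- ===== VERDICT (by name: the statement is the Claim_ definition above) =====
theorem build_event_summary_py_spec : Claim_equal_build_event_summary_py := by
  intro overall events _ _
  unfold Spec_build_event_summary_py build_event_summary_py build_event_summary_py_alt
  rw [pvB_fold]
  simp only [List.foldl_cons, List.foldl_nil, pvA_inner]
  simp
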